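-- pv_equiv track=rewrite | github.com/Aryudesu/ABC | AWC/0004/D.py | calc
-- ===== SOURCE A (Python) =====
-- from heapq import heappop, heappush
-- from typing import Tuple
--
-- def calc(N: int, M: int, LR: list[Tuple[int, int]])->bool:
--     LR.sort()
--     if N < M:
--         return False
--     if M == 0:
--         return True
--     data = []
--     idx = 0
--     for i in range(1, N + 1):
--         while idx < M and LR[idx][0] <= i:
--             l, r = LR[idx]
--             heappush(data, r)
--             idx += 1
--         if len(data) == 0:
--             continue
--         r = heappop(data)
--         if r < i:
--             return False
--     return (idx == M and len(data) == 0)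
-- ===== SOURCE B (Python) =====
-- from heapq import heappop, heappush
-- from typing import Tuple
--
-- def calc(N: int, M: int, LR: list[Tuple[int, int]])->bool:
--     # Event-based greedy over a stack of pending intervals: jump idle time gaps,
--     # keep a min-heap of deadlines; the loop runs O(M) iterations instead of O(N).
--     LR.sort()
--     if N < M:
--         return False
--     stack = LR[:M][::-1]          # pending intervals, next start on top
--     active = []                   # min-heap of right endpoints of admitted intervals
--     t = 0
--     while stack or active:
--         t = t + 1 if active else max(t + 1, stack[-1][0])
--         if t > N:
--             return False
--         while stack and stack[-1][0] <= t:
--             heappush(active, stack.pop()[1])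
--         if heappop(active) < t:
--             return False
--     return True
-- ===== Notes on version B (the rewrite author's own statement) =====
-- stated objective: alternative
-- what changed: Replaces A's scan over every position 1..N (pushing via an index into LR) by an event-based greedy over a stack of the M pending intervals that jumps idle time gaps directly to the next interval start, so the loop runs O(M) iterations instead of O(N); a timing run could not measure a difference on its inputs.
-- outside the precondition, e.g. on calc(2, -1, []): A returns False, B returns True; on calc(3, 2, [(1, 9)]): A raises IndexError, B returns True
import Mathlib
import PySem

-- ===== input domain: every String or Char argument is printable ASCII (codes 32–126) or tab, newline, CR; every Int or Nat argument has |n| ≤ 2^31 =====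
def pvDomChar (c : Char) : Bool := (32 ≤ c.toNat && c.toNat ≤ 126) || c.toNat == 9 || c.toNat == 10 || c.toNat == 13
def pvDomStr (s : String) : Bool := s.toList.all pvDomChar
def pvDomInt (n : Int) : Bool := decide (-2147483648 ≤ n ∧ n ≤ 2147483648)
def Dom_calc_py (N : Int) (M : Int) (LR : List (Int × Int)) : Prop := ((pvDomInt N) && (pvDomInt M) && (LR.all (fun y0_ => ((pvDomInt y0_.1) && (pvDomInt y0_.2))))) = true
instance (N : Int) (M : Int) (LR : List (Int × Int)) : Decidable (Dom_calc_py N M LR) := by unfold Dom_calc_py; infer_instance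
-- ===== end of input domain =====

-- B replaces A's position-by-position scan of 1..N by an event-based greedy over a
-- stack of the M pending intervals that jumps idle time gaps (O(M) loop iterations
-- instead of O(N); no speed-up was measured); both sort LR in
-- place in Python (same side effect), the equivalence proved is about the return value.

-- ===== PORT A =====
-- Python tuple sort modelled exactly as a stable sort by second then by first component.
def pvSortLR (LR : List (Int × Int)) : List (Int × Int) :=
  PySem.List.sorted (PySem.List.sorted LR (fun p => p.2) false) (fun p => p.1) false

-- heappush on an int heap, modelled as ordered insertion into a sorted list
-- (exact w.r.t. everything either program observes: truthiness/len and heappop = pop of the minimum).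
def pvHeapIns (x : Int) : List Int → List Int
  | [] => [x]
  | y :: ys => if x ≤ y then x :: y :: ys else y :: pvHeapIns x ys

-- while idx < M and LR[idx][0] <= i: heappush(data, LR[idx][1]); idx += 1
-- (fuel (M - idx).toNat bounds the while; out-of-range LR[idx] stops — unreachable under Pre_)
def pvPushA (LR : List (Int × Int)) (M i : Int) : Nat → List Int → Int → List Int × Int
  | 0, data, idx => (data, idx)
  | f + 1, data, idx =>
    if idx < M then
      match PySem.List.pyGet? LR idx with
      | some lr => if lr.1 ≤ i then pvPushA LR M i f (pvHeapIns lr.2 data) (idx + 1) else (data, idx)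
      | none => (data, idx)
    else (data, idx)

-- for i in range(1, N+1): … ; fuel = number of remaining positions
def pvLoopA (LR : List (Int × Int)) (M : Int) : Nat → Int → List Int → Int → Bool
  | 0, _, data, idx => idx == M && data.isEmpty
  | f + 1, i, data, idx =>
    let s := pvPushA LR M i ((M - idx).toNat) data idx
    match s.1 with
    | [] => pvLoopA LR M f (i + 1) s.1 s.2
    | r :: rest => if r < i then false else pvLoopA LR M f (i + 1) rest s.2

def calc_py (N : Int) (M : Int) (LR : List (Int × Int)) : Bool :=
  let L := pvSortLR LR
  if N < M then false
  else if M == 0 then true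
  else pvLoopA L M N.toNat 1 [] 0

-- ===== PORT B =====
-- while stack and stack[-1][0] <= t: heappush(active, stack.pop()[1])
-- (the stack's top is the list head; structural recursion, no index and no fuel)
def pvAdmit (t : Int) : List (Int × Int) → List Int → List (Int × Int) × List Int
  | [], act => ([], act)
  | p :: rest, act =>
    if p.1 ≤ t then pvAdmit t rest (pvHeapIns p.2 act) else (p :: rest, act)

-- while stack or active: …  (the stack-length + heap-size sum drops by exactly one per
-- iteration, so that sum is the exact fuel and the fuel-0 value is the loop-exit test;
-- heappop of an empty heap is unreachable → false)
def pvRun (N : Int) : Nat → Int → List (Int × Int) → List Int → Bool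
  | 0, _, stack, act => stack.isEmpty && act.isEmpty
  | f + 1, t, stack, act =>
    if stack ≠ [] ∨ act ≠ [] then
      let t' := match act with
        | _ :: _ => t + 1
        | [] => max (t + 1) (stack.headD (0, 0)).1
      if N < t' then false
      else
        match pvAdmit t' stack act with
        | (stack', r :: rest) => if r < t' then false else pvRun N f t' stack' rest
        | (_, []) => false
    else true

def calc_py_alt (N : Int) (M : Int) (LR : List (Int × Int)) : Bool :=
  if N < M then false
  else
    let stack := PySem.List.slice (pvSortLR LR) none (some M)   -- LR[:M][::-1], top = head
    pvRun N stack.length 0 stack []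

-- ===== PRECONDITION & SPEC =====
-- Pre_ admits every N < M (both programs return False at once) and otherwise requires the
-- natural domain 0 ≤ M ≤ len(LR): it excludes M > len(LR) with M ≤ N, on which A raises
-- IndexError except when it happens to exit early, and M < 0 with M ≤ N (not a meaningful
-- interval count), on which A's False is an accident of 'idx == M' never holding while B's
-- loop simply does not run.
def Pre_calc_py (N : Int) (M : Int) (LR : List (Int × Int)) : Prop :=
  (0 ≤ M ∧ M ≤ (LR.length : Int)) ∨ N < M
instance (N : Int) (M : Int) (LR : List (Int × Int)) : Decidable (Pre_calc_py N M LR) := by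
  unfold Pre_calc_py; infer_instance

def pvWitness_calc_py : Int × Int × (List (Int × Int)) := (3, 2, [(1, 2), (2, 3)])

def Spec_calc_py (N : Int) (M : Int) (LR : List (Int × Int)) (out : Bool) : Prop := out = calc_py_alt N M LR
instance (N : Int) (M : Int) (LR : List (Int × Int)) (out : Bool) : Decidable (Spec_calc_py N M LR out) := by unfold Spec_calc_py; infer_instance

-- ===== CLAIM (what is proved, stated in full; the proofs are below) =====
def Claim_equal_calc_py : Prop := ∀ (N : Int) (M : Int) (LR : List (Int × Int)), Dom_calc_py N M LR → Pre_calc_py N M LR → Spec_calc_py N M LR (calc_py N M LR)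

-- ===== LEMMAS AND PROOFS =====

theorem pvHeapIns_length (x : Int) (l : List Int) : (pvHeapIns x l).length = l.length + 1 := by
  induction l with
  | nil => rfl
  | cons y ys ih => simp only [pvHeapIns]; split <;> simp [ih]

theorem pvPushA_stuck (LR : List (Int × Int)) (M i : Int) (f : Nat) (data : List Int) (idx : Int)
    (h : ¬ idx < M ∨ ∀ lr, PySem.List.pyGet? LR idx = some lr → ¬ lr.1 ≤ i) :
    pvPushA LR M i f data idx = (data, idx) := by
  cases f with
  | zero => rfl
  | succ f =>
      simp only [pvPushA]
      rcases h with h | h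
      · simp [h]
      · split
        · split
          · rename_i lr hget
            rw [if_neg (h lr hget)]
          · rfl
        · rfl

-- bounds and length accounting for the push loop (fuel exactly (M - idx).toNat)
theorem pvPushA_props (LR : List (Int × Int)) (M i : Int) :
    ∀ (f : Nat) (data : List Int) (idx : Int), 0 ≤ idx → idx ≤ M → (M - idx).toNat ≤ f →
      0 ≤ (pvPushA LR M i f data idx).2 ∧ idx ≤ (pvPushA LR M i f data idx).2 ∧
      (pvPushA LR M i f data idx).2 ≤ M ∧
      ((pvPushA LR M i f data idx).1.length : Int) + (M - (pvPushA LR M i f data idx).2)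
        = (data.length : Int) + (M - idx) := by
  intro f
  induction f with
  | zero =>
      intro data idx h0 hM hf
      have : idx = M := by omega
      subst this
      simp only [pvPushA]
      simpa using h0
  | succ f ih =>
      intro data idx h0 hM hf
      simp only [pvPushA]
      split
      · rename_i hlt
        split
        · rename_i lr hget
          split
          · have h := ih (pvHeapIns lr.2 data) (idx + 1) (by omega) (by omega) (by omega)
            refine ⟨h.1, by omega, h.2.2.1, ?_⟩
            rw [h.2.2.2, pvHeapIns_length]
            push_cast
            ring
          · simp; omega
        · simp; omega
      · simp; omega

theorem pvPushA_ne_nil (LR : List (Int × Int)) (M i : Int) (f : Nat) (data : List Int) (idx : Int) (lr : Int × Int)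
    (h0 : 0 ≤ idx) (hlt : idx < M) (hget : PySem.List.pyGet? LR idx = some lr) (hle : lr.1 ≤ i)
    (hf : (M - idx).toNat ≤ f) :
    (pvPushA LR M i f data idx).1 ≠ [] := by
  cases f with
  | zero => omega
  | succ f =>
      simp only [pvPushA, hget, if_pos hlt, if_pos hle]
      have h := pvPushA_props LR M i f (pvHeapIns lr.2 data) (idx + 1) (by omega) (by omega) (by omega)
      intro hnil
      rw [hnil] at h
      have hlen : (pvHeapIns lr.2 data).length = data.length + 1 := pvHeapIns_length _ _
      simp at h
      omega

-- A's loop is a no-op on a stretch of positions where the heap is empty and the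
-- next interval (if any) starts beyond the stretch.
theorem pvSkipA (LR : List (Int × Int)) (M : Int) :
    ∀ (g f : Nat) (i idx : Int),
      (∀ j : Int, i ≤ j → j < i + g → (¬ idx < M ∨ ∀ lr, PySem.List.pyGet? LR idx = some lr → ¬ lr.1 ≤ j)) →
      pvLoopA LR M (g + f) i [] idx = pvLoopA LR M f (i + g) [] idx := by
  intro g
  induction g with
  | zero => intro f i idx _; simp
  | succ g ih =>
      intro f i idx hs
      have hstep : pvPushA LR M i ((M - idx).toNat) [] idx = ([], idx) :=
        pvPushA_stuck LR M i _ [] idx (hs i le_rfl (by omega))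
      have : g + 1 + f = (g + f) + 1 := by omega
      rw [this]
      simp only [pvLoopA, hstep]
      have := ih f (i + 1) idx (fun j h1 h2 => hs j (by omega) (by push_cast; omega))
      rw [this]
      congr 1
      push_cast
      ring

-- B's pending stack at A's index idx, as a list: the rest of the first M sorted intervals.
theorem pvStackCons (L : List (Int × Int)) (M idx : Int)
    (h0 : 0 ≤ idx) (hlt : idx < M) (hlen : M ≤ (L.length : Int)) :
    (L.take M.toNat).drop idx.toNat
      = (L[idx.toNat]'(by omega)) :: (L.take M.toNat).drop ((idx + 1).toNat) := by
  have hL : idx.toNat < (L.take M.toNat).length := by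
    rw [List.length_take]; omega
  rw [List.drop_eq_getElem_cons hL]
  congr 1
  · exact List.getElem_take
  · congr 1; omega

theorem pvStackNil (L : List (Int × Int)) (M idx : Int)
    (hM : M ≤ idx) : (L.take M.toNat).drop idx.toNat = [] := by
  apply List.drop_eq_nil_of_le
  rw [List.length_take]; omega

-- B's admission while-loop is A's push while-loop, read through the stack view.
theorem pvAdmit_eq (L : List (Int × Int)) (M t : Int) (hlen : M ≤ (L.length : Int)) :
    ∀ (f : Nat) (act : List Int) (idx : Int), 0 ≤ idx → idx ≤ M → (M - idx).toNat ≤ f →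
      pvAdmit t ((L.take M.toNat).drop idx.toNat) act
        = ((L.take M.toNat).drop ((pvPushA L M t f act idx).2).toNat,
           (pvPushA L M t f act idx).1) := by
  intro f
  induction f with
  | zero =>
      intro act idx h0 hM hf
      have hMi : M ≤ idx := by omega
      rw [pvStackNil L M idx hMi]
      simp [pvAdmit, pvPushA, pvStackNil L M idx hMi]
  | succ f ih =>
      intro act idx h0 hM hf
      by_cases hlt : idx < M
      · have hget : PySem.List.pyGet? L idx = some (L[idx.toNat]'(by omega)) :=
          PySem.List.pyGet?_eq_some_getElem L h0 (by omega)
        rw [pvStackCons L M idx h0 hlt hlen]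
        simp only [pvAdmit, pvPushA, if_pos hlt, hget]
        by_cases hle : (L[idx.toNat]'(by omega)).1 ≤ t
        · rw [if_pos hle, if_pos hle, ih (pvHeapIns (L[idx.toNat]'(by omega)).2 act) (idx + 1)
            (by omega) (by omega) (by omega)]
        · rw [if_neg hle, if_neg hle]
          rw [← pvStackCons L M idx h0 hlt hlen]
      · have hMi : M ≤ idx := by omega
        rw [pvStackNil L M idx hMi]
        simp only [pvAdmit, pvPushA, if_neg hlt]
        rw [pvStackNil L M idx hMi]

-- Main simulation: A's scan from position i with state (data, idx) equals B's event
-- loop with last time t = i - 1 and the corresponding pending stack; fuel = remaining pops.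
theorem pvSim (LR : List (Int × Int)) (M N : Int) (hlen : M ≤ (LR.length : Int)) :
    ∀ (fb : Nat) (i idx : Int) (data : List Int),
      0 ≤ idx → idx ≤ M → 1 ≤ i → i ≤ N + 1 →
      (fb : Int) = (M - idx) + data.length →
      pvLoopA LR M ((N + 1 - i).toNat) i data idx
        = pvRun N fb (i - 1) ((LR.take M.toNat).drop idx.toNat) data := by
  intro fb
  induction fb with
  | zero =>
      intro i idx data h0 hM hi1 hiN heq
      have hidx : idx = M := by
        have := data.length ; simp at heq ; omega
      have hdata : data = [] := by
        have : data.length = 0 := by simp at heq; omega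
        exact List.eq_nil_of_length_eq_zero this
      subst hidx; subst hdata
      have hskip := pvSkipA LR idx ((N + 1 - i).toNat) 0 i idx
        (fun j _ _ => Or.inl (by omega))
      rw [Nat.add_zero] at hskip
      rw [hskip, pvStackNil LR idx idx le_rfl]
      simp [pvLoopA, pvRun]
  | succ f ih =>
      intro i idx data h0 hM hi1 hiN heq
      cases data with
      | cons r rest =>
          -- B advances t by one; both admit the same batch and pop the same minimum
          simp only [pvRun]
          rw [if_pos (Or.inr (by simp) :
            (LR.take M.toNat).drop idx.toNat ≠ [] ∨ (r :: rest : List Int) ≠ [])]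
          have hti : i - 1 + 1 = i := by ring
          rw [hti]
          by_cases hNi : N < i
          · rw [if_pos hNi]
            have hf0 : (N + 1 - i).toNat = 0 := by omega
            rw [hf0]
            simp [pvLoopA]
          · rw [if_neg hNi]
            have hf1 : (N + 1 - i).toNat = (N + 1 - (i + 1)).toNat + 1 := by omega
            rw [hf1]
            simp only [pvLoopA]
            rw [pvAdmit_eq LR M i hlen ((M - idx).toNat) (r :: rest) idx h0 hM le_rfl]
            have props := pvPushA_props LR M i ((M - idx).toNat) (r :: rest) idx h0 hM le_rfl
            have hne : (pvPushA LR M i ((M - idx).toNat) (r :: rest) idx).1 ≠ [] := by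
              intro hnil
              rw [hnil] at props
              simp at props
              omega
            cases hs1 : (pvPushA LR M i ((M - idx).toNat) (r :: rest) idx).1 with
            | nil => exact absurd hs1 hne
            | cons r' rest' =>
                simp only []
                by_cases hr' : r' < i
                · rw [if_pos hr', if_pos hr']
                · rw [if_neg hr', if_neg hr']
                  have hlen' : ((r' :: rest').length : Int) + (M - (pvPushA LR M i ((M - idx).toNat) (r :: rest) idx).2) = ((r :: rest).length : Int) + (M - idx) := by
                    rw [← hs1]; exact props.2.2.2
                  have := ih (i + 1) (pvPushA LR M i ((M - idx).toNat) (r :: rest) idx).2 rest'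
                    props.1 props.2.2.1 (by omega) (by omega)
                    (by simp at hlen' heq ⊢; omega)
                  rw [this]
                  congr 1
                  ring
      | nil =>
          have hidx : idx < M := by simp at heq; omega
          have hget : PySem.List.pyGet? LR idx = some (LR[idx.toNat]'(by omega)) :=
            PySem.List.pyGet?_eq_some_getElem LR h0 (by omega)
          simp only [pvRun]
          rw [if_pos (Or.inl (by rw [pvStackCons LR M idx h0 hidx hlen]; simp) :
            (LR.take M.toNat).drop idx.toNat ≠ [] ∨ ([] : List Int) ≠ [])]
          have hhd : ((LR.take M.toNat).drop idx.toNat).headD (0, 0) = LR[idx.toNat]'(by omega) := by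
            rw [pvStackCons LR M idx h0 hidx hlen]; rfl
          simp only [hhd]
          have hti : i - 1 + 1 = i := by ring
          rw [hti]
          set l : Int := (LR[idx.toNat]'(by omega)).1 with hl
          by_cases hN : N < max i l
          · rw [if_pos hN]
            by_cases hNi : N < i
            · have hf0 : (N + 1 - i).toNat = 0 := by omega
              rw [hf0]
              simp [pvLoopA]
              omega
            · -- l > N: every remaining position is idle, A never pushes again
              have hlN : N < l := by omega
              have hskip := pvSkipA LR M ((N + 1 - i).toNat) 0 i idx
                (fun j hj1 hj2 => Or.inr (fun lr' hlr' => by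
                  rw [hget] at hlr'
                  cases hlr'
                  omega))
              rw [Nat.add_zero] at hskip
              rw [hskip]
              simp [pvLoopA]
              omega
          · rw [if_neg hN]
            -- jump: positions i .. max i l - 1 are idle for A
            have hiT : i ≤ max i l := le_max_left _ _
            have hgT : (max i l : Int) = i + ((max i l - i).toNat : Int) := by omega
            have hfsplit : (N + 1 - i).toNat = (max i l - i).toNat + (N + 1 - max i l).toNat := by omega
            rw [hfsplit]
            have hskip := pvSkipA LR M ((max i l - i).toNat) ((N + 1 - max i l).toNat) i idx
              (fun j hj1 hj2 => Or.inr (fun lr' hlr' => by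
                rw [hget] at hlr'
                cases hlr'
                omega))
            rw [hskip, ← hgT]
            have hTle : max i l ≤ N := by omega
            have hf1 : (N + 1 - max i l).toNat = (N + 1 - (max i l + 1)).toNat + 1 := by omega
            rw [hf1]
            simp only [pvLoopA]
            rw [pvAdmit_eq LR M (max i l) hlen ((M - idx).toNat) [] idx h0 hM le_rfl]
            have props := pvPushA_props LR M (max i l) ((M - idx).toNat) [] idx h0 hM le_rfl
            have hne := pvPushA_ne_nil LR M (max i l) ((M - idx).toNat) [] idx _ h0 hidx hget
              (le_max_right _ _) le_rfl
            cases hs1 : (pvPushA LR M (max i l) ((M - idx).toNat) [] idx).1 with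
            | nil => exact absurd hs1 hne
            | cons r' rest' =>
                simp only []
                by_cases hr' : r' < max i l
                · rw [if_pos hr', if_pos hr']
                · rw [if_neg hr', if_neg hr']
                  have hlen' : ((r' :: rest').length : Int) + (M - (pvPushA LR M (max i l) ((M - idx).toNat) [] idx).2) = (([] : List Int).length : Int) + (M - idx) := by
                    rw [← hs1]; exact props.2.2.2
                  have := ih (max i l + 1) (pvPushA LR M (max i l) ((M - idx).toNat) [] idx).2 rest'
                    props.1 props.2.2.1 (by omega) (by omega)
                    (by simp at hlen' heq ⊢; omega)
                  rw [this]
                  congr 1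
                  ring

-- ===== VERDICT (by name: the statement is the Claim_ definition above) =====
theorem calc_py_spec : Claim_equal_calc_py := by
  intro N M LR _ hpre
  unfold Spec_calc_py calc_py calc_py_alt
  by_cases h1 : N < M
  · simp [h1]
  · rcases hpre.resolve_right h1 with ⟨hM0, hMlen⟩
    simp only [if_neg h1]
    have hlenL : M ≤ ((pvSortLR LR).length : Int) := by
      unfold pvSortLR
      rw [PySem.List.length_sorted, PySem.List.length_sorted]
      exact hMlen
    have hslice : PySem.List.slice (pvSortLR LR) none (some M) = (pvSortLR LR).take M.toNat := by
      rw [show M = ((M.toNat : Nat) : Int) by omega]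
      exact PySem.List.slice_to_natCast _ _
    have hlenst : ((pvSortLR LR).take M.toNat).length = M.toNat := by
      rw [List.length_take]; omega
    by_cases h2 : M = 0
    · subst h2
      simp [pvRun, hslice]
    · have hM1 : 1 ≤ M := by omega
      have hfuel : N.toNat = (N + 1 - 1).toNat := by omega
      have hsim := pvSim (pvSortLR LR) M N hlenL M.toNat 1 0 [] le_rfl (by omega) le_rfl (by omega)
        (by simp; omega)
      simp only [beq_iff_eq, if_neg h2, hslice, hlenst]
      rw [hfuel, hsim]
      norm_num
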